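-- pv_equiv track=rewrite | github.com/aav-antonov/DEA | libDEA/select_base_by_rations.py | unique_indexes_ordered
-- ===== SOURCE A (Python) =====
-- def unique_indexes_ordered(combos):
--     seen = set()
--     out = []
--     for idx, _ in combos:
--         if idx not in seen:
--             seen.add(idx)
--             out.append(idx)
--     return sorted(out)
-- ===== SOURCE B (Python) =====
-- def unique_indexes_ordered(combos):
--     idxs = sorted(idx for idx, _ in combos)
--     out = []
--     for x in idxs:
--         if not out or out[-1] != x:
--             out.append(x)
--     return out
-- ===== Notes on version B (the rewrite author's own statement) =====
-- stated objective: alternative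
-- what changed: B sorts the first components up front and deduplicates by a single adjacency pass over the sorted list (compare with the last appended element), eliminating A's hash set and its membership-test deduplication followed by a final sort.
import Mathlib
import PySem

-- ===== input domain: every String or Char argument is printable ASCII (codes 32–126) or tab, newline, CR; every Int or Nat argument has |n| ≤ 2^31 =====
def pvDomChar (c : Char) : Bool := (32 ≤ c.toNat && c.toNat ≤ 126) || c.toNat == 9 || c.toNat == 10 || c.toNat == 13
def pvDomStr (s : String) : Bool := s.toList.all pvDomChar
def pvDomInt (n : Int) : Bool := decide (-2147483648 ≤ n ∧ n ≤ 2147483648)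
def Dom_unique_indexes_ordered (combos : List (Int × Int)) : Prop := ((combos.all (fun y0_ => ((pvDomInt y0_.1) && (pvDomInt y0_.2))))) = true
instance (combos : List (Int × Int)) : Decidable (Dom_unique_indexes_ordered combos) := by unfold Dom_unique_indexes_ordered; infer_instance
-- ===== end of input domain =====

-- B replaces A's hash-set deduplication + final sort by sort-first, then a single adjacency-dedup pass (alternative decomposition, same asymptotic cost).

-- ===== PORT A =====
def unique_indexes_ordered (combos : List (Int × Int)) : List Int :=
  let st := combos.foldl
    (fun (st : PySem.Set Int × List Int) p =>
      if PySem.Set.contains st.1 p.1 then st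
      else (PySem.Set.add st.1 p.1, st.2 ++ [p.1]))
    (PySem.Set.empty, [])
  PySem.List.sorted st.2 (fun x => x) false

-- ===== PORT B =====
def unique_indexes_ordered_alt (combos : List (Int × Int)) : List Int :=
  let idxs := PySem.List.sorted (combos.map Prod.fst) (fun x => x) false
  idxs.foldl (fun out x => if out = [] ∨ out.getLast? ≠ some x then out ++ [x] else out) []

-- ===== PRECONDITION & SPEC =====
def Spec_unique_indexes_ordered (combos : List (Int × Int)) (out : List Int) : Prop := out = unique_indexes_ordered_alt combos
instance (combos : List (Int × Int)) (out : List Int) : Decidable (Spec_unique_indexes_ordered combos out) := by unfold Spec_unique_indexes_ordered; infer_instance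

-- ===== CLAIM (what is proved, stated in full; the proofs are below) =====
def Claim_equal_unique_indexes_ordered : Prop := ∀ (combos : List (Int × Int)), Dom_unique_indexes_ordered combos → Spec_unique_indexes_ordered combos (unique_indexes_ordered combos)

-- ===== LEMMAS AND PROOFS =====

-- two strictly increasing Int lists with the same members are equal
theorem pvEqOfLtOfMem (l₁ l₂ : List Int) (h₁ : l₁.Pairwise (· < ·)) (h₂ : l₂.Pairwise (· < ·))
    (hm : ∀ x, x ∈ l₁ ↔ x ∈ l₂) : l₁ = l₂ := by
  have n₁ : l₁.Nodup := h₁.imp (fun h => ne_of_lt h)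
  have n₂ : l₂.Nodup := h₂.imp (fun h => ne_of_lt h)
  have hp : l₁.Perm l₂ := (List.perm_ext_iff_of_nodup n₁ n₂).mpr hm
  exact List.Perm.eq_of_pairwise' (h₁.imp le_of_lt) (h₂.imp le_of_lt) hp

-- invariant of A's accumulation loop
theorem pvAfold (combos : List (Int × Int)) :
    ∀ (seen : PySem.Set Int) (out : List Int),
    (∀ x, x ∈ seen ↔ x ∈ out) → out.Nodup →
    (∀ x, x ∈ (combos.foldl
      (fun (st : PySem.Set Int × List Int) p =>
        if PySem.Set.contains st.1 p.1 then st
        else (PySem.Set.add st.1 p.1, st.2 ++ [p.1])) (seen, out)).2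
      ↔ x ∈ out ∨ x ∈ combos.map Prod.fst) ∧
    ((combos.foldl
      (fun (st : PySem.Set Int × List Int) p =>
        if PySem.Set.contains st.1 p.1 then st
        else (PySem.Set.add st.1 p.1, st.2 ++ [p.1])) (seen, out)).2).Nodup := by
  induction combos with
  | nil => intro seen out hms hn; simpa using hn
  | cons p rest ih =>
    intro seen out hms hn
    simp only [List.foldl_cons]
    by_cases hc : PySem.Set.contains seen p.1 = true
    · have hmem : p.1 ∈ out := (hms p.1).mp ((PySem.Set.contains_iff _ _).mp hc)
      simp only [hc, if_pos]
      obtain ⟨hm', hn'⟩ := ih seen out hms hn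
      refine ⟨fun x => ?_, hn'⟩
      rw [hm']
      simp only [List.map_cons, List.mem_cons]
      constructor
      · tauto
      · rintro (h | h | h)
        · exact Or.inl h
        · exact Or.inl (h ▸ hmem)
        · exact Or.inr h
    · have hnotseen : p.1 ∉ seen := fun h => hc ((PySem.Set.contains_iff _ _).mpr h)
      have hnotout : p.1 ∉ out := fun h => hnotseen ((hms p.1).mpr h)
      simp only [hc, if_neg, Bool.false_eq_true, not_false_iff]
      have hms' : ∀ x, x ∈ PySem.Set.add seen p.1 ↔ x ∈ out ++ [p.1] := by
        intro x
        rw [PySem.Set.mem_add]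
        simp [hms x]
      have hn' : (out ++ [p.1]).Nodup := by
        refine List.Nodup.append hn (List.nodup_singleton _) ?_
        intro a ha hb
        simp only [List.mem_singleton] at hb
        exact hnotout (hb ▸ ha)
      obtain ⟨hm', hn''⟩ := ih (PySem.Set.add seen p.1) (out ++ [p.1]) hms' hn'
      refine ⟨fun x => ?_, hn''⟩
      rw [hm']
      simp only [List.mem_append, List.map_cons, List.mem_cons]
      tauto

-- in a strictly increasing list the last element is the maximum
theorem pvLeGetLast : ∀ (l : List Int) (a x : Int), l.Pairwise (· < ·) → a ∈ l →
    l.getLast? = some x → a ≤ x := by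
  intro l
  induction l with
  | nil => intro a x _ h; simp at h
  | cons b t ih =>
    intro a x hp ha hl
    cases t with
    | nil =>
      simp at ha hl; omega
    | cons c u =>
      rw [List.getLast?_cons_cons] at hl
      rcases List.mem_cons.mp ha with rfl | hat
      · have hx : x ∈ c :: u := List.mem_of_getLast? hl
        exact le_of_lt ((List.pairwise_cons.mp hp).1 x hx)
      · exact ih a x (List.pairwise_cons.mp hp).2 hat hl

-- invariant of B's adjacency-dedup pass over the sorted list
theorem pvBfold (idxs : List Int) :
    ∀ (out : List Int), idxs.Pairwise (· ≤ ·) → out.Pairwise (· < ·) →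
    (∀ a ∈ out, ∀ b ∈ idxs, a ≤ b) →
    (idxs.foldl (fun out x => if out = [] ∨ out.getLast? ≠ some x then out ++ [x] else out) out).Pairwise (· < ·) ∧
    (∀ x, x ∈ idxs.foldl (fun out x => if out = [] ∨ out.getLast? ≠ some x then out ++ [x] else out) out
      ↔ x ∈ out ∨ x ∈ idxs) := by
  induction idxs with
  | nil => intro out _ hp _; exact ⟨hp, by simp⟩
  | cons x rest ih =>
    intro out hs hp hle
    have hs' := (List.pairwise_cons.mp hs).2
    have hxrest := (List.pairwise_cons.mp hs).1
    simp only [List.foldl_cons]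
    by_cases hg : out = [] ∨ out.getLast? ≠ some x
    · simp only [hg, if_pos]
      have hlt : ∀ a ∈ out, a < x := by
        intro a ha
        have hax : a ≤ x := hle a ha x (List.mem_cons_self ..)
        rcases hg with rfl | hgl
        · simp at ha
        · rcases eq_or_lt_of_le hax with rfl | h
          · exfalso
            obtain ⟨l, hl⟩ : ∃ l, out.getLast? = some l := by
              cases hout : out.getLast? with
              | none => exact absurd (List.getLast?_eq_none_iff.mp hout) (by rintro rfl; simp at ha)
              | some l => exact ⟨l, rfl⟩
            have h1 : a ≤ l := pvLeGetLast out a l hp ha hl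
            have h2 : l ≤ a := hle l (List.mem_of_getLast? hl) a (List.mem_cons_self ..)
            have : l = a := le_antisymm h2 h1
            exact hgl (this ▸ hl)
          · exact h
      have hp' : (out ++ [x]).Pairwise (· < ·) := by
        rw [List.pairwise_append]
        exact ⟨hp, List.pairwise_singleton _ _, by simpa using hlt⟩
      have hle' : ∀ a ∈ out ++ [x], ∀ b ∈ rest, a ≤ b := by
        intro a ha b hb
        rcases List.mem_append.mp ha with h | h
        · exact le_trans (hle a h x (List.mem_cons_self ..)) (hxrest b hb)
        · simp at h; exact h ▸ hxrest b hb
      obtain ⟨h1, h2⟩ := ih (out ++ [x]) hs' hp' hle'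
      refine ⟨h1, fun y => ?_⟩
      rw [h2]
      simp only [List.mem_append, List.mem_cons]
      tauto
    · simp only [hg, if_neg, not_false_iff]
      rw [not_or, not_not] at hg
      have hxout : x ∈ out := by
        have := hg.2
        exact List.mem_of_getLast? this
      have hle' : ∀ a ∈ out, ∀ b ∈ rest, a ≤ b :=
        fun a ha b hb => hle a ha b (List.mem_cons_of_mem _ hb)
      obtain ⟨h1, h2⟩ := ih out hs' hp hle'
      refine ⟨h1, fun y => ?_⟩
      rw [h2]
      simp only [List.mem_cons]
      constructor
      · tauto
      · rintro (h | h | h)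
        · exact Or.inl h
        · exact Or.inl (h ▸ hxout)
        · exact Or.inr h

-- ===== VERDICT (by name: the statement is the Claim_ definition above) =====
theorem unique_indexes_ordered_spec : Claim_equal_unique_indexes_ordered := by
  intro combos _
  unfold Spec_unique_indexes_ordered unique_indexes_ordered unique_indexes_ordered_alt
  simp only []
  obtain ⟨hamem, handup⟩ := pvAfold combos PySem.Set.empty [] (by simp [PySem.Set.empty]) List.nodup_nil
  set outA := (combos.foldl
    (fun (st : PySem.Set Int × List Int) p =>
      if PySem.Set.contains st.1 p.1 then st
      else (PySem.Set.add st.1 p.1, st.2 ++ [p.1])) (PySem.Set.empty, [])).2 with houtA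
  -- A's result: sorted outA
  have hAperm : (PySem.List.sorted outA (fun x => x) false).Perm outA := PySem.List.sorted_perm _ _ _
  have hAle : (PySem.List.sorted outA (fun x => x) false).Pairwise (· ≤ ·) :=
    PySem.List.sorted_pairwise _ _
  have hAnd : (PySem.List.sorted outA (fun x => x) false).Nodup := hAperm.nodup_iff.mpr handup
  have hAlt : (PySem.List.sorted outA (fun x => x) false).Pairwise (· < ·) := by
    have := hAle.and hAnd
    exact this.imp (fun h => lt_of_le_of_ne h.1 h.2)
  have hAmem : ∀ x, x ∈ PySem.List.sorted outA (fun x => x) false ↔ x ∈ combos.map Prod.fst := by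
    intro x
    rw [hAperm.mem_iff, hamem x]
    simp
  -- B's result
  set idxs := PySem.List.sorted (combos.map Prod.fst) (fun x => x) false with hidxs
  have hsle : idxs.Pairwise (· ≤ ·) := PySem.List.sorted_pairwise _ _
  obtain ⟨hBlt, hBmem⟩ := pvBfold idxs [] hsle List.Pairwise.nil (by simp)
  refine pvEqOfLtOfMem _ _ hAlt hBlt (fun x => ?_)
  rw [hAmem x, hBmem x]
  have : x ∈ idxs ↔ x ∈ combos.map Prod.fst := PySem.List.mem_sorted ..
  simp [this]
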